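-- pv_equiv track=rewrite | github.com/gabrieljreed/advent-of-code-2024 | 05/main.py | split_input_text
-- ===== SOURCE A (Python) =====
-- def split_input_text(text: str) -> tuple[list[str], list[str]]:
--     """Split input text into rules and updates."""
--     lines = text.splitlines()
--
--     rules: list[str] = []
--     updates: list[str] = []
--
--     is_rules = True
--
--     for line in lines:
--         if line.strip() == "":
--             is_rules = False
--             continue
--         if is_rules:
--             rules.append(line)
--         else:
--             updates.append(line)
--
--     return rules, updates
-- ===== SOURCE B (Python) =====
-- def split_input_text(text: str) -> tuple[list[str], list[str]]:
--     """Split input text into rules and updates."""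
--     lines = text.splitlines()
--     idx = next((i for i, line in enumerate(lines) if line.strip() == ""), len(lines))
--     rules = lines[:idx]
--     updates = [line for line in lines[idx + 1:] if line.strip() != ""]
--     return rules, updates
-- ===== Notes on version B (the rewrite author's own statement) =====
-- stated objective: simpler
-- what changed: Replaces the single flag-driven accumulating pass with a locate-then-slice decomposition: find the index of the first blank line, take the slice before it as rules, and filter the blank lines out of the slice after it as updates.
import Mathlib
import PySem

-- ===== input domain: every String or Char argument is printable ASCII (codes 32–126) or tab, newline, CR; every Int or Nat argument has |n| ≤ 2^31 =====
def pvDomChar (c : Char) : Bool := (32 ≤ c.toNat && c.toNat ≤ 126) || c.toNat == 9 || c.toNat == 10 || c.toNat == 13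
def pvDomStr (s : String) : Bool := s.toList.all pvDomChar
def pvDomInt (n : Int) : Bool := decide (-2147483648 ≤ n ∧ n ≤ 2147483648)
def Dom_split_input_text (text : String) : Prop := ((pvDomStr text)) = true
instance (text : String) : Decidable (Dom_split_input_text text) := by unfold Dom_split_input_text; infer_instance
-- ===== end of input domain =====

-- B replaces A's flag-driven accumulating pass by locate-first-blank, slice, filter: simpler decomposition, same O(n) cost.


-- ===== PORT A =====
-- the body of A's for-loop, one step of the fold over (rules, updates, is_rules)
def pvStepA (st : List String × List String × Bool) (line : String) : List String × List String × Bool :=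
  if PySem.Str.strip line == "" then (st.1, st.2.1, false)
  else if st.2.2 then (st.1 ++ [line], st.2.1, st.2.2)
  else (st.1, st.2.1 ++ [line], st.2.2)

def split_input_text (text : String) : List String × List String :=
  let lines := PySem.Str.splitlines text
  let st := lines.foldl pvStepA ([], [], true)
  (st.1, st.2.1)

-- ===== PORT B =====
-- the generator expression: index of the first line whose strip() is "", default len(lines)
def pvFirstBlank : List String → Nat
  | [] => 0
  | l :: ls => if PySem.Str.strip l == "" then 0 else pvFirstBlank ls + 1

def split_input_text_alt (text : String) : List String × List String :=
  let lines := PySem.Str.splitlines text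
  let idx := pvFirstBlank lines
  (lines.take idx, (lines.drop (idx + 1)).filter (fun line => !(PySem.Str.strip line == "")))

-- ===== PRECONDITION & SPEC =====
def Spec_split_input_text (text : String) (out : List String × List String) : Prop := out = split_input_text_alt text
instance (text : String) (out : List String × List String) : Decidable (Spec_split_input_text text out) := by unfold Spec_split_input_text; infer_instance

-- ===== CLAIM (what is proved, stated in full; the proofs are below) =====
def Claim_equal_split_input_text : Prop := ∀ (text : String), Dom_split_input_text text → Spec_split_input_text text (split_input_text text)

-- ===== LEMMAS AND PROOFS =====

-- after the first blank line the loop only filters non-blank lines into updates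
theorem pvLoop_false (lines : List String) (r u : List String) :
    lines.foldl pvStepA (r, u, false) =
      (r, u ++ lines.filter (fun line => !(PySem.Str.strip line == "")), false) := by
  induction lines generalizing u with
  | nil => simp
  | cons l ls ih =>
    by_cases h : PySem.Str.strip l == ""
    · simp [pvStepA, h, ih]
    · simp [pvStepA, h, ih]

-- while the flag is still true the loop realises B's take / drop-then-filter decomposition
theorem pvLoop_true (lines : List String) (r u : List String) :
    ∃ b, lines.foldl pvStepA (r, u, true) =
      (r ++ lines.take (pvFirstBlank lines),
       u ++ (lines.drop (pvFirstBlank lines + 1)).filter (fun line => !(PySem.Str.strip line == "")),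
       b) := by
  induction lines generalizing r u with
  | nil => exact ⟨true, by simp⟩
  | cons l ls ih =>
    by_cases h : PySem.Str.strip l == ""
    · refine ⟨false, ?_⟩
      simp [pvStepA, h, pvFirstBlank, pvLoop_false]
    · obtain ⟨b, hb⟩ := ih (r ++ [l]) u
      refine ⟨b, ?_⟩
      simp [pvStepA, h, pvFirstBlank, hb]

-- ===== VERDICT (by name: the statement is the Claim_ definition above) =====
theorem split_input_text_spec : Claim_equal_split_input_text := by
  intro text _
  unfold Spec_split_input_text split_input_text split_input_text_alt
  obtain ⟨b, hb⟩ := pvLoop_true (PySem.Str.splitlines text) [] []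
  simp [hb]
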